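-- pv_equiv track=rewrite | github.com/swoonge/r2r2r_to_gr00t | convert_yumi_to_gr00t.py | build_joint_order
-- ===== SOURCE A (Python) =====
-- def build_joint_order(joint_names: list[str]) -> tuple[list[int], list[str]]:
--     left_idxs = [
--         i for i, name in enumerate(joint_names) if name.endswith("_l") and "gripper" not in name
--     ]
--     right_idxs = [
--         i for i, name in enumerate(joint_names) if name.endswith("_r") and "gripper" not in name
--     ]
--     gripper_idxs = [i for i, name in enumerate(joint_names) if "gripper" in name]
--     ordered = left_idxs + right_idxs + gripper_idxs
--     ordered_names = [joint_names[i] for i in ordered]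
--     return ordered, ordered_names
-- ===== SOURCE B (Python) =====
-- def build_joint_order(joint_names: list[str]) -> tuple[list[int], list[str]]:
--     def group(name: str):
--         if "gripper" in name:
--             return 2
--         if name.endswith("_l"):
--             return 0
--         if name.endswith("_r"):
--             return 1
--         return None
--
--     keyed = [(g, i) for i, n in enumerate(joint_names) if (g := group(n)) is not None]
--     keyed.sort(key=lambda t: t[0])  # stable sort: left(0), right(1), gripper(2)
--     ordered = [i for _, i in keyed]
--     ordered_names = [joint_names[i] for i in ordered]
--     return ordered, ordered_names
-- ===== Notes on version B (the rewrite author's own statement) =====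
-- stated objective: alternative
-- what changed: B tags each index once with a numeric group key (gripper=2, _l=0, _r=1, else dropped) and obtains the final order by a single stable sort on that key, instead of A's three separate filtered enumerate passes concatenated.
import Mathlib
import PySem

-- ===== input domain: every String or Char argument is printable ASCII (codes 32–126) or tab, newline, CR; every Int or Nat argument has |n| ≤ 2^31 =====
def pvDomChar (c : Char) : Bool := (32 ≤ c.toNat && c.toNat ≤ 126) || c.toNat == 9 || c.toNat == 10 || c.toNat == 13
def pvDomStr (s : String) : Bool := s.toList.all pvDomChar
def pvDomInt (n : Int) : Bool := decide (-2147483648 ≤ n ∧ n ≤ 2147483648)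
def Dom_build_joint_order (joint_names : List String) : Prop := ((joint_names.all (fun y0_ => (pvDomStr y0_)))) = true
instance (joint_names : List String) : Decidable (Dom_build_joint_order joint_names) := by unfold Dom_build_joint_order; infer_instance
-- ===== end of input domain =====

-- B tags each index with a numeric group key and obtains the order by one stable sort on that key,
-- instead of A's three separate filtered passes; objective: alternative.

-- ===== PORT A =====
-- A: three filtered comprehensions over enumerate, concatenated, then a lookup pass.
def build_joint_order (joint_names : List String) : List Int × List String :=
  let left_idxs := (PySem.List.enumerate joint_names).filterMap
    (fun p => if PySem.Str.endswith p.2 "_l" && !PySem.Str.isIn "gripper" p.2 then some p.1 else none)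
  let right_idxs := (PySem.List.enumerate joint_names).filterMap
    (fun p => if PySem.Str.endswith p.2 "_r" && !PySem.Str.isIn "gripper" p.2 then some p.1 else none)
  let gripper_idxs := (PySem.List.enumerate joint_names).filterMap
    (fun p => if PySem.Str.isIn "gripper" p.2 then some p.1 else none)
  let ordered := left_idxs ++ right_idxs ++ gripper_idxs
  -- joint_names[i]: every i comes from enumerate, hence in range; pyGetD's default is never used
  let ordered_names := ordered.map (fun i => PySem.List.pyGetD joint_names i "")
  (ordered, ordered_names)

-- ===== PORT B =====
-- B: group(name) → Some key (gripper=2, _l=0, _r=1) or None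
def bjoGroup (n : String) : Option Int :=
  if PySem.Str.isIn "gripper" n then some 2
  else if PySem.Str.endswith n "_l" then some 0
  else if PySem.Str.endswith n "_r" then some 1
  else none

def build_joint_order_alt (joint_names : List String) : List Int × List String :=
  let keyed := (PySem.List.enumerate joint_names).filterMap
    (fun p => (bjoGroup p.2).map (fun g => (g, p.1)))
  let sortedKeyed := PySem.List.sorted keyed (fun t => t.1) false   -- keyed.sort(key=lambda t: t[0]), stable
  let ordered := sortedKeyed.map (fun t => t.2)
  let ordered_names := ordered.map (fun i => PySem.List.pyGetD joint_names i "")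
  (ordered, ordered_names)

-- ===== PRECONDITION & SPEC =====
def Spec_build_joint_order (joint_names : List String) (out : List Int × List String) : Prop := out = build_joint_order_alt joint_names
instance (joint_names : List String) (out : List Int × List String) : Decidable (Spec_build_joint_order joint_names out) := by unfold Spec_build_joint_order; infer_instance

-- ===== CLAIM (what is proved, stated in full; the proofs are below) =====
def Claim_equal_build_joint_order : Prop := ∀ (joint_names : List String), Dom_build_joint_order joint_names → Spec_build_joint_order joint_names (build_joint_order joint_names)

-- ===== LEMMAS AND PROOFS =====

-- the comparison used by the stable sort on the group key
def bjoBef (a b : Int × Int) : Bool := decide (a.1 < b.1)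

-- inserting past a block of elements it does not go before
theorem insertBy_skip (x : Int × Int) (l t : List (Int × Int))
    (h : ∀ y ∈ l, bjoBef x y = false) :
    PySem.List.insertBy bjoBef x (l ++ t) = l ++ PySem.List.insertBy bjoBef x t := by
  induction l with
  | nil => simp
  | cons y l ih =>
    have hy : bjoBef x y = false := h y (by simp)
    simp only [List.cons_append, PySem.List.insertBy, hy]
    simp only [Bool.false_eq_true, if_false]
    rw [ih (fun z hz => h z (by simp [hz]))]

-- an element goes right in front of a nonempty block of strictly larger keys
theorem insertBy_front (x : Int × Int) (t : List (Int × Int))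
    (h : ∀ y ∈ t, x.1 < y.1) :
    PySem.List.insertBy bjoBef x t = x :: t := by
  cases t with
  | nil => simp [PySem.List.insertBy]
  | cons y ys =>
    have : bjoBef x y = true := by simp [bjoBef]; exact h y (by simp)
    simp [PySem.List.insertBy, this]

-- stability characterisation: insertion-sorting pairs with keys in {0,1,2} by key
-- produces exactly the key-0, key-1, key-2 sublists in order
theorem foldl_grouped (xs : List (Int × Int)) (a0 a1 a2 : List (Int × Int))
    (hxs : ∀ p ∈ xs, p.1 = 0 ∨ p.1 = 1 ∨ p.1 = 2)
    (h0 : ∀ p ∈ a0, p.1 = 0) (h1 : ∀ p ∈ a1, p.1 = 1) (h2 : ∀ p ∈ a2, p.1 = 2) :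
    xs.foldl (fun acc x => PySem.List.insertBy bjoBef x acc) (a0 ++ a1 ++ a2)
      = (a0 ++ xs.filter (fun p => p.1 == 0)) ++ (a1 ++ xs.filter (fun p => p.1 == 1))
        ++ (a2 ++ xs.filter (fun p => p.1 == 2)) := by
  induction xs generalizing a0 a1 a2 with
  | nil => simp
  | cons x rest ih =>
    have hx := hxs x (by simp)
    have hrest : ∀ p ∈ rest, p.1 = 0 ∨ p.1 = 1 ∨ p.1 = 2 := fun p hp => hxs p (by simp [hp])
    simp only [List.foldl_cons]
    rcases hx with hx | hx | hx
    · -- key 0: skip a0, land in front of a1 ++ a2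
      have step : PySem.List.insertBy bjoBef x (a0 ++ a1 ++ a2) = (a0 ++ [x]) ++ a1 ++ a2 := by
        rw [List.append_assoc, insertBy_skip x a0 (a1 ++ a2)
          (fun y hy => by simp [bjoBef, hx, h0 y hy]),
          insertBy_front x (a1 ++ a2)
          (fun y hy => by
            rcases List.mem_append.mp hy with hy | hy
            · rw [hx, h1 y hy]; norm_num
            · rw [hx, h2 y hy]; norm_num)]
        simp
      rw [step, ih (a0 ++ [x]) a1 a2 hrest
        (fun p hp => by rcases List.mem_append.mp hp with hp | hp
                        · exact h0 p hp
                        · simp at hp; rw [hp]; exact hx) h1 h2]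
      simp [hx]
    · -- key 1: skip a0 ++ a1, land in front of a2
      have step : PySem.List.insertBy bjoBef x (a0 ++ a1 ++ a2) = a0 ++ (a1 ++ [x]) ++ a2 := by
        rw [insertBy_skip x (a0 ++ a1) a2
          (fun y hy => by
            rcases List.mem_append.mp hy with hy | hy
            · simp [bjoBef, hx, h0 y hy]
            · simp [bjoBef, hx, h1 y hy]),
          insertBy_front x a2 (fun y hy => by rw [hx, h2 y hy]; norm_num)]
        simp
      rw [step, ih a0 (a1 ++ [x]) a2 hrest h0
        (fun p hp => by rcases List.mem_append.mp hp with hp | hp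
                        · exact h1 p hp
                        · simp at hp; rw [hp]; exact hx) h2]
      simp [hx]
    · -- key 2: append at the very end
      have step : PySem.List.insertBy bjoBef x (a0 ++ a1 ++ a2) = a0 ++ a1 ++ (a2 ++ [x]) := by
        rw [PySem.List.insertBy_of_forall_not_before bjoBef x (a0 ++ a1 ++ a2)
          (fun y hy => by
            rcases List.mem_append.mp hy with hy | hy
            · rcases List.mem_append.mp hy with hy | hy
              · simp [bjoBef, hx, h0 y hy]
              · simp [bjoBef, hx, h1 y hy]
            · simp [bjoBef, hx, h2 y hy])]
        simp
      rw [step, ih a0 a1 (a2 ++ [x]) hrest h0 h1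
        (fun p hp => by rcases List.mem_append.mp hp with hp | hp
                        · exact h2 p hp
                        · simp at hp; rw [hp]; exact hx)]
      simp [hx]

-- no ASCII string ends with both "_l" and "_r"
theorem pv_not_l_and_r (cs : List Char) :
    PySem.Chars.endswith cs ['_', 'l'] = true → PySem.Chars.endswith cs ['_', 'r'] = true → False := by
  intro h1 h2
  rw [PySem.Chars.endswith_iff] at h1
  rw [PySem.Chars.endswith_iff] at h2
  obtain ⟨t1, ht1⟩ := h1
  obtain ⟨t2, ht2⟩ := h2
  have e1 : cs.getLast? = some 'l' := by rw [← ht1]; simp [List.getLast?_append]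
  have e2 : cs.getLast? = some 'r' := by rw [← ht2]; simp [List.getLast?_append]
  rw [e1] at e2
  simp at e2

theorem pv_not_l_and_r' (n : String) :
    PySem.Str.endswith n "_l" = true → PySem.Str.endswith n "_r" = true → False := by
  simp only [PySem.Str.endswith_eq]
  exact pv_not_l_and_r n.toList

-- the keyed list B builds from 'enumerate names i'
def bjoKeyed (names : List String) (i : Int) : List (Int × Int) :=
  (PySem.List.enumerate names i).filterMap (fun p => (bjoGroup p.2).map (fun g => (g, p.1)))

theorem bjoGroup_range (n : String) (g : Int) (h : bjoGroup n = some g) :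
    g = 0 ∨ g = 1 ∨ g = 2 := by
  unfold bjoGroup at h
  split_ifs at h <;> simp_all

theorem bjoKeyed_keys (names : List String) (i : Int) :
    ∀ p ∈ bjoKeyed names i, p.1 = 0 ∨ p.1 = 1 ∨ p.1 = 2 := by
  intro p hp
  simp only [bjoKeyed, List.mem_filterMap] at hp
  obtain ⟨q, _, hq⟩ := hp
  cases h : bjoGroup q.2 with
  | none => rw [h] at hq; simp at hq
  | some g =>
    rw [h] at hq
    simp only [Option.map_some, Option.some.injEq] at hq
    rw [← hq]
    exact bjoGroup_range q.2 g h

-- each key-filtered projection of the keyed list is A's corresponding filtered pass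
theorem bjoKeyed_groups (names : List String) (i : Int) :
    ((bjoKeyed names i).filter (fun p => p.1 == 0)).map (fun p => p.2)
      = (PySem.List.enumerate names i).filterMap
          (fun p => if PySem.Str.endswith p.2 "_l" && !PySem.Str.isIn "gripper" p.2 then some p.1 else none)
    ∧ ((bjoKeyed names i).filter (fun p => p.1 == 1)).map (fun p => p.2)
      = (PySem.List.enumerate names i).filterMap
          (fun p => if PySem.Str.endswith p.2 "_r" && !PySem.Str.isIn "gripper" p.2 then some p.1 else none)
    ∧ ((bjoKeyed names i).filter (fun p => p.1 == 2)).map (fun p => p.2)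
      = (PySem.List.enumerate names i).filterMap
          (fun p => if PySem.Str.isIn "gripper" p.2 then some p.1 else none) := by
  induction names generalizing i with
  | nil => simp [bjoKeyed, PySem.List.enumerate_nil]
  | cons n rest ih =>
    have ih' := ih (i + 1)
    simp only [bjoKeyed, PySem.List.enumerate_cons, List.filterMap_cons] at *
    by_cases hg : PySem.Str.isIn "gripper" n = true
    · have hbg : bjoGroup n = some 2 := by unfold bjoGroup; rw [hg]; rfl
      simp only [hbg, Option.map_some, hg, Bool.not_true, Bool.and_false]
      exact ⟨ih'.1, ih'.2.1, congrArg (List.cons i) ih'.2.2⟩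
    · rw [Bool.not_eq_true] at hg
      by_cases hl : PySem.Str.endswith n "_l" = true
      · have hr : PySem.Str.endswith n "_r" = false := by
          cases h : PySem.Str.endswith n "_r"
          · rfl
          · exact absurd (pv_not_l_and_r' n hl h) (fun f => f)
        have hbg : bjoGroup n = some 0 := by unfold bjoGroup; rw [hg, hl]; rfl
        simp only [hbg, Option.map_some, hg, hl, hr]
        exact ⟨congrArg (List.cons i) ih'.1, ih'.2.1, ih'.2.2⟩
      · rw [Bool.not_eq_true] at hl
        by_cases hr : PySem.Str.endswith n "_r" = true
        · have hbg : bjoGroup n = some 1 := by unfold bjoGroup; rw [hg, hl, hr]; rfl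
          simp only [hbg, Option.map_some, hg, hl, hr]
          exact ⟨ih'.1, congrArg (List.cons i) ih'.2.1, ih'.2.2⟩
        · rw [Bool.not_eq_true] at hr
          have hbg : bjoGroup n = none := by unfold bjoGroup; rw [hg, hl, hr]; rfl
          simp only [hbg, Option.map_none, hg, hl, hr]
          exact ih'

-- ===== VERDICT (by name: the statement is the Claim_ definition above) =====
theorem build_joint_order_spec : Claim_equal_build_joint_order := by
  intro joint_names _
  unfold Spec_build_joint_order build_joint_order build_joint_order_alt
  have hsort : PySem.List.sorted (bjoKeyed joint_names 0) (fun t => t.1) false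
      = (bjoKeyed joint_names 0).filter (fun p => p.1 == 0)
        ++ (bjoKeyed joint_names 0).filter (fun p => p.1 == 1)
        ++ (bjoKeyed joint_names 0).filter (fun p => p.1 == 2) := by
    rw [PySem.List.sorted_eq_foldl_insertBy]
    have := foldl_grouped (bjoKeyed joint_names 0) [] [] []
      (bjoKeyed_keys joint_names 0) (by simp) (by simp) (by simp)
    simpa [bjoBef] using this
  obtain ⟨hL, hR, hG⟩ := bjoKeyed_groups joint_names 0
  simp only [bjoKeyed] at hsort hL hR hG
  simp only [hsort, List.map_append, hL, hR, hG]
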